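-- pv_equiv track=rewrite | github.com/nils-imhoff/dvent_of_code_2024 | python/day9/day9.py | find_free_spans
-- ===== SOURCE A (Python) =====
-- from typing import List, Tuple
--
-- def find_free_spans(blocks: List[str]) -> List[Tuple[int, int]]:
--     """
--     Identifies all free space spans on the disk.
--     Returns a list of tuples: (start_index, length)
--     """
--     free_spans = []
--     i = 0
--     while i < len(blocks):
--         if blocks[i] == '.':
--             start = i
--             while i < len(blocks) and blocks[i] == '.':
--                 i += 1
--             length = i - start
--             free_spans.append((start, length))
--         else:
--             i += 1
--     return free_spans
-- ===== SOURCE B (Python) =====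
-- from typing import List, Tuple
--
-- def _merge(positions: List[int]) -> List[Tuple[int, int]]:
--     """Merge a sorted list of distinct indices into (start, length) spans,
--     building the result back-to-front: walk the indices in reverse and either
--     extend the most recently started span downwards or open a new one."""
--     spans: List[Tuple[int, int]] = []
--     for i in reversed(positions):
--         if spans and spans[-1][0] == i + 1:
--             start, length = spans[-1]
--             spans[-1] = (i, length + 1)
--         else:
--             spans.append((i, 1))
--     spans.reverse()
--     return spans
--
-- def find_free_spans(blocks: List[str]) -> List[Tuple[int, int]]:
--     dot_positions = [i for i, b in enumerate(blocks) if b == '.']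
--     return _merge(dot_positions)
-- ===== Notes on version B (the rewrite author's own statement) =====
-- stated objective: alternative
-- what changed: Instead of A's nested while-loops scanning blocks by index, B first extracts the list of '.' indices with one comprehension and then builds the spans back-to-front by walking those indices in reverse, extending the most recent span downwards or opening a new one.
import Mathlib
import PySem

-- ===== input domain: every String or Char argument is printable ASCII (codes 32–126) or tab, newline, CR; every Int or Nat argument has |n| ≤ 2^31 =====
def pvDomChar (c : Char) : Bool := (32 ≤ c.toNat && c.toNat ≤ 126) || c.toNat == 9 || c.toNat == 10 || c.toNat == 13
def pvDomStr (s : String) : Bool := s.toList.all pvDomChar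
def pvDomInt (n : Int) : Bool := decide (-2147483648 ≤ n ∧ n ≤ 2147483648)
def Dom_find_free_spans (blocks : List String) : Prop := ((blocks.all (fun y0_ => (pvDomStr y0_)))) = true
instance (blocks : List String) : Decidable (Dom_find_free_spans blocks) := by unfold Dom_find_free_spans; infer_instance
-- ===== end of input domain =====

-- B replaces A's nested index/while scan with two stages: extract the list of '.' indices,
-- then recursively merge consecutive indices into (start, length) spans back-to-front (alternative; same cost).

-- ===== PORT A =====
-- inner `while i < len(blocks) and blocks[i] == '.': i += 1`
def aInner (blocks : List String) (i : Nat) : Nat :=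
  if h : i < blocks.length ∧ blocks[i]! = "." then aInner blocks (i + 1) else i
termination_by blocks.length - i
decreasing_by omega

-- termination fact the outer loop cites: the inner while strictly advances when entered
theorem aInner_gt (blocks : List String) (i : Nat)
    (h : i < blocks.length ∧ blocks[i]! = ".") : i < aInner blocks i := by
  rw [aInner, dif_pos h]
  suffices h2 : ∀ k, k ≤ aInner blocks k from lt_of_lt_of_le (Nat.lt_succ_self i) (h2 (i + 1))
  intro k
  induction k using aInner.induct blocks with
  | case1 k hk ih => rw [aInner, dif_pos hk]; omega
  | case2 k hk => rw [aInner, dif_neg hk]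

-- outer `while i < len(blocks): …`
def aLoop (blocks : List String) (i : Nat) (acc : List (Int × Int)) : List (Int × Int) :=
  if h : i < blocks.length then
    if hd : blocks[i]! = "." then
      let start := i
      let j := aInner blocks i
      aLoop blocks j (acc ++ [((start : Int), (j : Int) - (start : Int))])
    else
      aLoop blocks (i + 1) acc
  else acc
termination_by blocks.length - i
decreasing_by
  · have := aInner_gt blocks i ⟨h, hd⟩; omega
  · omega

def find_free_spans (blocks : List String) : List (Int × Int) :=
  aLoop blocks 0 []

-- ===== PORT B =====
-- loop body of `_merge`: inspect/replace spans[-1] or append a fresh one-block span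
def bIterStep (spans : List (Int × Int)) (i : Int) : List (Int × Int) :=
  match spans.getLast? with
  | some (s, l) => if s = i + 1 then spans.dropLast ++ [(i, l + 1)] else spans ++ [(i, 1)]
  | none => spans ++ [(i, 1)]

-- `_merge(positions)`: fold the loop body over reversed(positions), then spans.reverse()
def bMerge (positions : List Int) : List (Int × Int) :=
  (positions.reverse.foldl bIterStep []).reverse

-- `[i for i, b in enumerate(blocks) if b == '.']` with running index i
def bDots : List String → Int → List Int
  | [], _ => []
  | x :: xs, i => (if x = "." then [i] else []) ++ bDots xs (i + 1)

def find_free_spans_alt (blocks : List String) : List (Int × Int) :=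
  bMerge (bDots blocks 0)

-- ===== PRECONDITION & SPEC =====
def Spec_find_free_spans (blocks : List String) (out : List (Int × Int)) : Prop := out = find_free_spans_alt blocks
instance (blocks : List String) (out : List (Int × Int)) : Decidable (Spec_find_free_spans blocks out) := by unfold Spec_find_free_spans; infer_instance

-- ===== CLAIM (what is proved, stated in full; the proofs are below) =====
def Claim_equal_find_free_spans : Prop := ∀ (blocks : List String), Dom_find_free_spans blocks → Spec_find_free_spans blocks (find_free_spans blocks)

-- ===== LEMMAS AND PROOFS =====

-- canonical one-pass characterisation both ports are reduced to
def cSpan (blocks : List String) (off : Int) : List (Int × Int) :=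
  match blocks with
  | [] => []
  | x :: xs =>
    if x = "." then
      (off, ((xs.takeWhile (fun y => y = ".")).length : Int) + 1) ::
        cSpan (xs.dropWhile (fun y => y = ".")) (off + (xs.takeWhile (fun y => y = ".")).length + 1)
    else cSpan xs (off + 1)
termination_by blocks.length
decreasing_by
  · have := List.length_dropWhile_le (fun y => decide (y = ".")) xs
    simpa using Nat.lt_succ_of_le this
  · simp

theorem cSpan_nil (off : Int) : cSpan [] off = [] := by rw [cSpan]

theorem cSpan_cons (x : String) (xs : List String) (off : Int) :
    cSpan (x :: xs) off =
      if x = "." then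
        (off, ((xs.takeWhile (fun y => y = ".")).length : Int) + 1) ::
          cSpan (xs.dropWhile (fun y => y = ".")) (off + (xs.takeWhile (fun y => y = ".")).length + 1)
      else cSpan xs (off + 1) := by rw [cSpan]

-- every span of cSpan ys o starts at or after o (only the head is needed)
theorem cSpan_start_ge (ys : List String) (o : Int) (s l : Int) (rest : List (Int × Int))
    (h : cSpan ys o = (s, l) :: rest) : o ≤ s := by
  induction ys, o using cSpan.induct generalizing s l rest with
  | case1 o => rw [cSpan_nil] at h; cases h
  | case2 o xs ih =>
    rw [cSpan_cons, if_pos rfl] at h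
    cases h; omega
  | case3 o x xs hx ih =>
    rw [cSpan_cons, if_neg hx] at h
    have := ih _ _ _ h; omega

-- one-step unfolding of cSpan at a '.', phrased as B's merge step on cSpan of the tail
theorem cSpan_dot_cons (ys : List String) (off : Int) :
    cSpan ("." :: ys) off =
      match cSpan ys (off + 1) with
      | (s, l) :: rest => if s = off + 1 then (off, l + 1) :: rest else (off, 1) :: (s, l) :: rest
      | [] => [(off, 1)] := by
  rw [cSpan_cons, if_pos rfl]
  cases ys with
  | nil =>
    simp [cSpan_nil]
  | cons y ys' =>
    by_cases hy : y = "."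
    · subst hy
      have h1 : cSpan ("." :: ys') (off + 1) =
          (off + 1, ((ys'.takeWhile (fun z => z = ".")).length : Int) + 1) ::
            cSpan (ys'.dropWhile (fun z => z = "."))
              (off + 1 + (ys'.takeWhile (fun z => z = ".")).length + 1) := by
        rw [cSpan_cons, if_pos rfl]
      rw [h1]
      dsimp only
      rw [if_pos rfl]
      simp only [List.takeWhile_cons, decide_true, List.dropWhile_cons, if_true,
        List.length_cons]
      rw [List.cons_eq_cons]
      refine ⟨?_, ?_⟩
      · rw [Prod.mk.injEq]
        exact ⟨rfl, by push_cast; ring⟩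
      · congr 1
        push_cast; ring
    · have ht : (y :: ys').takeWhile (fun z => z = ".") = [] := by
        simp [hy]
      have hd2 : (y :: ys').dropWhile (fun z => z = ".") = y :: ys' := by
        simp [hy]
      rw [ht, hd2]
      simp only [List.length_nil, Nat.cast_zero, zero_add, add_zero]
      have hstep : cSpan (y :: ys') (off + 1) = cSpan ys' (off + 1 + 1) := by
        rw [cSpan_cons, if_neg hy]
      cases hc : cSpan (y :: ys') (off + 1) with
      | nil => simp
      | cons p rest =>
        obtain ⟨s, l⟩ := p
        rw [hstep] at hc
        have hs : off + 1 + 1 ≤ s := cSpan_start_ge _ _ _ _ _ hc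
        dsimp only
        rw [if_neg (by omega)]

-- proof helper: the back-to-front merge written as structural recursion
def cMerge : List Int → List (Int × Int)
  | [] => []
  | head :: tl =>
    match cMerge tl with
    | (s, l) :: rest => if s = head + 1 then (head, l + 1) :: rest else (head, 1) :: (s, l) :: rest
    | [] => [(head, 1)]

-- the reversed foldl of B's loop body computes cMerge
theorem bMerge_eq_cMerge (positions : List Int) : bMerge positions = cMerge positions := by
  induction positions with
  | nil => simp [bMerge, cMerge]
  | cons p ps ih =>
    unfold bMerge at ih ⊢
    rw [List.reverse_cons, List.foldl_append, List.foldl_cons, List.foldl_nil]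
    cases hc : cMerge ps with
    | nil =>
      have hM : ps.reverse.foldl bIterStep [] = [] := by
        have := ih
        rw [hc] at this
        simpa using this
      simp [hM, bIterStep, cMerge, hc]
    | cons q rest =>
      obtain ⟨s, l⟩ := q
      have hM : ps.reverse.foldl bIterStep [] = rest.reverse ++ [(s, l)] := by
        have h := congrArg List.reverse ih
        rw [List.reverse_reverse, hc] at h
        rw [h]
        simp
      rw [hM]
      unfold bIterStep
      rw [List.getLast?_concat]
      dsimp only
      by_cases hs : s = p + 1
      · rw [if_pos hs, List.dropLast_concat]
        rw [cMerge, hc]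
        dsimp only
        rw [if_pos hs]
        simp
      · rw [if_neg hs]
        rw [cMerge, hc]
        dsimp only
        rw [if_neg hs]
        simp

-- B equals the canonical characterisation
theorem bMerge_bDots (blocks : List String) : ∀ off : Int,
    bMerge (bDots blocks off) = cSpan blocks off := by
  induction blocks with
  | nil => intro off; simp [bDots, bMerge, cSpan_nil]
  | cons x xs ih =>
    intro off
    simp only [bMerge_eq_cMerge] at ih ⊢
    by_cases hx : x = "."
    · subst hx
      have hb : bDots ("." :: xs) off = off :: bDots xs (off + 1) := by
        simp [bDots]
      rw [hb, cMerge, ih, cSpan_dot_cons]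
    · have hb : bDots (x :: xs) off = bDots xs (off + 1) := by
        simp [bDots, hx]
      rw [hb, ih, cSpan_cons, if_neg hx]

theorem dropWhile_eq_drop_len (p : String → Bool) :
    ∀ (l : List String), l.dropWhile p = l.drop (l.takeWhile p).length := by
  intro l
  induction l with
  | nil => simp
  | cons a as ih =>
    by_cases hp : p a
    · simp [hp, ih]
    · simp [hp]

theorem aInner_eq (blocks : List String) : ∀ i,
    aInner blocks i = i + ((blocks.drop i).takeWhile (fun y => y = ".")).length := by
  intro i
  induction i using aInner.induct blocks with
  | case1 i h ih =>
    obtain ⟨hlt, hdot⟩ := h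
    have hget : blocks[i]! = blocks[i] := getElem!_pos blocks i hlt
    have hdrop : blocks.drop i = blocks[i] :: blocks.drop (i + 1) :=
      (List.getElem_cons_drop hlt).symm
    rw [aInner, dif_pos ⟨hlt, hdot⟩, ih, hdrop]
    rw [hget] at hdot
    simp [hdot]
    omega
  | case2 i h =>
    rw [aInner, dif_neg h]
    by_cases hlt : i < blocks.length
    · have hdot : ¬ blocks[i]! = "." := fun hd => h ⟨hlt, hd⟩
      have hget : blocks[i]! = blocks[i] := getElem!_pos blocks i hlt
      have hdrop : blocks.drop i = blocks[i] :: blocks.drop (i + 1) :=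
        (List.getElem_cons_drop hlt).symm
      rw [hget] at hdot
      rw [hdrop]
      simp [hdot]
    · have hnil : blocks.drop i = [] := List.drop_eq_nil_of_le (by omega)
      simp [hnil]

theorem dropWhile_drop (blocks : List String) (i : Nat) :
    (blocks.drop i).dropWhile (fun y => y = ".") =
      blocks.drop (i + ((blocks.drop i).takeWhile (fun y => y = ".")).length) := by
  rw [dropWhile_eq_drop_len, List.drop_drop]

theorem aLoop_eq (blocks : List String) : ∀ i acc,
    aLoop blocks i acc = acc ++ cSpan (blocks.drop i) (i : Int) := by
  intro i acc
  induction i, acc using aLoop.induct blocks with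
  | case1 i acc h hd st j ih1 =>
    have hget : blocks[i]! = blocks[i] := getElem!_pos blocks i h
    have hdrop : blocks.drop i = blocks[i] :: blocks.drop (i + 1) :=
      (List.getElem_cons_drop h).symm
    rw [aLoop]
    dsimp only
    rw [dif_pos h, dif_pos hd, ih1]
    rw [hget] at hd
    have hk : aInner blocks i = i + ((blocks.drop i).takeWhile (fun y => y = ".")).length :=
      aInner_eq blocks i
    have hkpos : ((blocks.drop (i+1)).takeWhile (fun y => y = ".")).length + 1 =
        ((blocks.drop i).takeWhile (fun y => y = ".")).length := by
      rw [hdrop]; simp [hd]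
    conv_rhs => rw [hdrop, cSpan_cons]
    rw [if_pos hd, List.append_assoc, List.singleton_append]
    have hdw : (blocks.drop (i+1)).dropWhile (fun y => y = ".") =
        blocks.drop (aInner blocks i) := by
      rw [hk, ← hkpos, dropWhile_drop]
      congr 1
      omega
    rw [hdw]
    have hst : st = i := rfl
    have hjj : j = aInner blocks i := rfl
    rw [hst, hjj]
    have hj : ((aInner blocks i : Nat) : Int) =
        (i : Int) + ((blocks.drop (i+1)).takeWhile (fun y => y = ".")).length + 1 := by
      rw [hk, ← hkpos]; push_cast; ring
    rw [hj]
    have harith : (i : Int) + ((blocks.drop (i+1)).takeWhile (fun y => y = ".")).length + 1 - i =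
        ((blocks.drop (i+1)).takeWhile (fun y => y = ".")).length + 1 := by ring
    rw [harith]
  | case2 i acc h hd ih =>
    have hget : blocks[i]! = blocks[i] := getElem!_pos blocks i h
    have hdrop : blocks.drop i = blocks[i] :: blocks.drop (i + 1) :=
      (List.getElem_cons_drop h).symm
    rw [aLoop]
    dsimp only
    rw [dif_pos h, dif_neg hd, ih]
    rw [hget] at hd
    conv_rhs => rw [hdrop, cSpan_cons]
    rw [if_neg hd]
    congr 1
  | case3 i acc h =>
    rw [aLoop, dif_neg h]
    have hnil : blocks.drop i = [] := List.drop_eq_nil_of_le (by omega)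
    simp [hnil, cSpan_nil]

-- ===== VERDICT (by name: the statement is the Claim_ definition above) =====
theorem find_free_spans_spec : Claim_equal_find_free_spans := by
  intro blocks _
  unfold Spec_find_free_spans find_free_spans find_free_spans_alt
  rw [aLoop_eq, bMerge_bDots]
  simp
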